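-- pv_equiv track=rewrite | github.com/R2RT/llvm-project | clang/bindings/python/self-diagnose.py | pythonize_name
-- ===== SOURCE A (Python) =====
-- def pythonize_name(name: str) -> str:
--     if name == 'CXCursor_NonTypeTemplateParameter':
--         return 'TEMPLATE_NON_TYPE_PARAMETER'
--     if name == 'CXCursor_StmtExpr':
--         return 'StmtExpr'
--     if name == 'CXCursor_UnaryExpr':
--         return 'CXX_UNARY_EXPR'
--     if name == 'CXCursor_UnaryExpr':
--         return 'CXX_UNARY_EXPR'
--     if name == 'CXCursor_CompoundAssignOperator':
--         return 'COMPOUND_ASSIGNMENT_OPERATOR'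
--     if name == 'CXCursor_ObjCBridgedCastExpr':
--         return 'OBJC_BRIDGE_CAST_EXPR'
--     if name == 'CXCursor_CXXAccessSpecifier':
--         return 'CXX_ACCESS_SPEC_DECL'
--     if name == 'CXCursor_MSAsmStmt':
--         return 'MS_ASM_STMT'
--     if name == 'CXCursor_MSAsmStmt':
--         return 'OMP_PARALLELFORDIRECTIVE'
--     if name == 'CXCursor_OMPTargetTeamsDistributeParallelForDirective':
--         return 'OMP_DISTRIBUTE_PARALLELFORDIRECTIVE'
--     if name == 'CXCursor_OMPTargetTeamsDistributeParallelForDirective':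
--         return 'OMP_DISTRIBUTE_PARALLELFORDIRECTIVE'
--     if name == 'CXCursor_ObjCBoolLiteralExpr':
--         return 'OBJ_BOOL_LITERAL_EXPR'
--     if name == 'CXCursor_ObjCSelfExpr':
--         return 'OBJ_SELF_EXPR'
--     if name == 'CXCursor_NoDuplicateAttr':
--         return 'NODUPLICATE_ATTR'
--     if name == 'CXCursor_OMPTargetParallelForSimdDirective':
--         return 'OMP_TARGET_PARALLEL_FOR_SIMD_DIRECTIVE'
--     if name == 'CXCursor_OMPParallelForDirective':
--         return 'OMP_PARALLEL_FOR_DIRECTIVE'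
--     if name == 'CXCursor_OMPTargetParallelForDirective':
--         return 'OMP_TARGET_PARALLELFOR_DIRECTIVE'
--     if name == 'CXCursor_OMPDistributeParallelForDirective':
--         return 'OMP_DISTRIBUTE_PARALLELFOR_DIRECTIVE'
--     if name == 'CXCursor_OMPDistributeParallelForSimdDirective':
--         return 'OMP_DISTRIBUTE_PARALLEL_FOR_SIMD_DIRECTIVE'
--
--     assert '_' in name
--     start = name.find('_') + 1
--     name = name.replace('ObjC', 'OBJC_')
--     name = name.replace('CXX', 'CXX_')
--     name = name.replace('SEH', 'SEH_')
--     name = name.replace('OMP', 'OMP_')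
--     name = name.replace('GNU', 'GNU_')
--     name = name.replace('IB', 'IB_')
--     name = name.replace('ParallelForSimd', 'PARALLELFORSimd')
--     name = name.replace('ParallelForDirective', 'ParallelForDirective'.upper())
--     name = name.replace('ParallelFor', 'PARALLELFOR')
--
--     r = str.upper(name[start])
--     for k in range(start + 1, len(name)):
--         if k > start + 1 and name[k].isupper() and name[k - 1].islower():
--             r += '_'
--         r += str.upper(name[k])
--     if r.endswith("PORT"): # IMPORT/EXPORT
--         r += '_ATTR'
--     return r
-- ===== SOURCE B (Python) =====
-- SPECIAL_CASES = [
--     ('CXCursor_NonTypeTemplateParameter', 'TEMPLATE_NON_TYPE_PARAMETER'),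
--     ('CXCursor_StmtExpr', 'StmtExpr'),
--     ('CXCursor_UnaryExpr', 'CXX_UNARY_EXPR'),
--     ('CXCursor_UnaryExpr', 'CXX_UNARY_EXPR'),
--     ('CXCursor_CompoundAssignOperator', 'COMPOUND_ASSIGNMENT_OPERATOR'),
--     ('CXCursor_ObjCBridgedCastExpr', 'OBJC_BRIDGE_CAST_EXPR'),
--     ('CXCursor_CXXAccessSpecifier', 'CXX_ACCESS_SPEC_DECL'),
--     ('CXCursor_MSAsmStmt', 'MS_ASM_STMT'),
--     ('CXCursor_MSAsmStmt', 'OMP_PARALLELFORDIRECTIVE'),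
--     ('CXCursor_OMPTargetTeamsDistributeParallelForDirective', 'OMP_DISTRIBUTE_PARALLELFORDIRECTIVE'),
--     ('CXCursor_OMPTargetTeamsDistributeParallelForDirective', 'OMP_DISTRIBUTE_PARALLELFORDIRECTIVE'),
--     ('CXCursor_ObjCBoolLiteralExpr', 'OBJ_BOOL_LITERAL_EXPR'),
--     ('CXCursor_ObjCSelfExpr', 'OBJ_SELF_EXPR'),
--     ('CXCursor_NoDuplicateAttr', 'NODUPLICATE_ATTR'),
--     ('CXCursor_OMPTargetParallelForSimdDirective', 'OMP_TARGET_PARALLEL_FOR_SIMD_DIRECTIVE'),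
--     ('CXCursor_OMPParallelForDirective', 'OMP_PARALLEL_FOR_DIRECTIVE'),
--     ('CXCursor_OMPTargetParallelForDirective', 'OMP_TARGET_PARALLELFOR_DIRECTIVE'),
--     ('CXCursor_OMPDistributeParallelForDirective', 'OMP_DISTRIBUTE_PARALLELFOR_DIRECTIVE'),
--     ('CXCursor_OMPDistributeParallelForSimdDirective', 'OMP_DISTRIBUTE_PARALLEL_FOR_SIMD_DIRECTIVE'),
-- ]
--
-- REWRITE_RULES = [
--     ('ObjC', 'OBJC_'),
--     ('CXX', 'CXX_'),
--     ('SEH', 'SEH_'),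
--     ('OMP', 'OMP_'),
--     ('GNU', 'GNU_'),
--     ('IB', 'IB_'),
--     ('ParallelForSimd', 'PARALLELFORSimd'),
--     ('ParallelForDirective', 'PARALLELFORDIRECTIVE'),
--     ('ParallelFor', 'PARALLELFOR'),
-- ]
--
--
-- def pythonize_name(name: str) -> str:
--     for key, value in SPECIAL_CASES:
--         if name == key:
--             return value
--     assert '_' in name
--     start = name.find('_') + 1
--     for old, new in REWRITE_RULES:
--         name = name.replace(old, new)
--     # Two phases instead of a char-by-char accumulator loop: first compute the cut
--     # positions (lowercase->uppercase boundaries after the kept first character),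
--     # then slice the name into words, join them with '_' and uppercase once.
--     cuts = [k for k in range(start + 2, len(name))
--             if name[k].isupper() and name[k - 1].islower()]
--     bounds = [start + 1] + cuts + [len(name)]
--     body = '_'.join(name[i:j] for i, j in zip(bounds, bounds[1:]))
--     r = (name[start] + body).upper()
--     return r + '_ATTR' if r.endswith('PORT') else r
-- ===== Notes on version B (the rewrite author's own statement) =====
-- stated objective: alternative
-- what changed: B replaces A's single char-by-char accumulator loop (which decides per index whether to emit '_' and uppercases each character as it goes) by a two-phase word-splitting algorithm: it first computes the list of cut positions (lowercase-to-uppercase boundaries after the kept first character), then slices the name into words at those bounds, joins the words with '_' and uppercases the whole string once; the if-chain and replace chain become first-match data tables.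
import Mathlib
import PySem

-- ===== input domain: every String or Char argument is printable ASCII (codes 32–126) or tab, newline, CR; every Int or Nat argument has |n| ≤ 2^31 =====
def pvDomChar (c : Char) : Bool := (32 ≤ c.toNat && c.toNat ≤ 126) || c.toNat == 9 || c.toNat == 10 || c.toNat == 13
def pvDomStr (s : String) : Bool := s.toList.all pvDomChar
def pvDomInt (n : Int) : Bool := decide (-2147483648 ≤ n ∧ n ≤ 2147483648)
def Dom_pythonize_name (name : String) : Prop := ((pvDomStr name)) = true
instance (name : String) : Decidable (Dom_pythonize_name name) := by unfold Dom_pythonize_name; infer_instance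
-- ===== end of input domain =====

-- B replaces A's char-by-char accumulator loop by a two-phase algorithm: compute the cut
-- positions (lower→upper boundaries after the kept first character), slice the name into
-- words at those bounds, join with '_' and uppercase once; an alternative of the same cost.

-- ===== PORT A =====
-- A's character loop, exactly as written: r starts as the uppercased name[start], then for
-- k in range(start+1, len(name)) an underscore is inserted when k > start+1 and name[k] is
-- upper and name[k-1] is lower; Python raises IndexError at name[start] when start is out of
-- range (the 'none' branch; excluded by Pre_).  Loop indices k are always in range, so the
-- default of pyGetD is never used.
def pvCoreA (cs : List Char) (start : Int) : String :=
  match PySem.List.pyGet? cs start with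
  | none => ""   -- Python: IndexError at name[start]; excluded by Pre_
  | some c =>
    let r : List Char := [PySem.Chars.upperChar c]
    let r := (PySem.List.pyRange (start + 1) (PySem.Chars.len cs) 1).foldl
      (fun r k =>
        let r := if decide (start + 1 < k) && PySem.Chars.isupper (PySem.List.pyGetD cs k ' ')
                    && PySem.Chars.islower (PySem.List.pyGetD cs (k - 1) ' ')
                 then r ++ ['_'] else r
        r ++ [PySem.Chars.upperChar (PySem.List.pyGetD cs k ' ')]) r
    let r := if PySem.Chars.endswith r "PORT".toList then r ++ "_ATTR".toList else r
    String.ofList r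

-- the 'assert "_" in name' is not ported: names without '_' (AssertionError) are outside Pre_
def pythonize_name (name : String) : String :=
  if name = "CXCursor_NonTypeTemplateParameter" then "TEMPLATE_NON_TYPE_PARAMETER"
  else if name = "CXCursor_StmtExpr" then "StmtExpr"
  else if name = "CXCursor_UnaryExpr" then "CXX_UNARY_EXPR"
  else if name = "CXCursor_UnaryExpr" then "CXX_UNARY_EXPR"
  else if name = "CXCursor_CompoundAssignOperator" then "COMPOUND_ASSIGNMENT_OPERATOR"
  else if name = "CXCursor_ObjCBridgedCastExpr" then "OBJC_BRIDGE_CAST_EXPR"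
  else if name = "CXCursor_CXXAccessSpecifier" then "CXX_ACCESS_SPEC_DECL"
  else if name = "CXCursor_MSAsmStmt" then "MS_ASM_STMT"
  else if name = "CXCursor_MSAsmStmt" then "OMP_PARALLELFORDIRECTIVE"
  else if name = "CXCursor_OMPTargetTeamsDistributeParallelForDirective" then "OMP_DISTRIBUTE_PARALLELFORDIRECTIVE"
  else if name = "CXCursor_OMPTargetTeamsDistributeParallelForDirective" then "OMP_DISTRIBUTE_PARALLELFORDIRECTIVE"
  else if name = "CXCursor_ObjCBoolLiteralExpr" then "OBJ_BOOL_LITERAL_EXPR"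
  else if name = "CXCursor_ObjCSelfExpr" then "OBJ_SELF_EXPR"
  else if name = "CXCursor_NoDuplicateAttr" then "NODUPLICATE_ATTR"
  else if name = "CXCursor_OMPTargetParallelForSimdDirective" then "OMP_TARGET_PARALLEL_FOR_SIMD_DIRECTIVE"
  else if name = "CXCursor_OMPParallelForDirective" then "OMP_PARALLEL_FOR_DIRECTIVE"
  else if name = "CXCursor_OMPTargetParallelForDirective" then "OMP_TARGET_PARALLELFOR_DIRECTIVE"
  else if name = "CXCursor_OMPDistributeParallelForDirective" then "OMP_DISTRIBUTE_PARALLELFOR_DIRECTIVE"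
  else if name = "CXCursor_OMPDistributeParallelForSimdDirective" then "OMP_DISTRIBUTE_PARALLEL_FOR_SIMD_DIRECTIVE"
  else
    let start : Int := PySem.Str.find name "_" + 1
    let n1 := PySem.Str.replace name "ObjC" "OBJC_"
    let n2 := PySem.Str.replace n1 "CXX" "CXX_"
    let n3 := PySem.Str.replace n2 "SEH" "SEH_"
    let n4 := PySem.Str.replace n3 "OMP" "OMP_"
    let n5 := PySem.Str.replace n4 "GNU" "GNU_"
    let n6 := PySem.Str.replace n5 "IB" "IB_"
    let n7 := PySem.Str.replace n6 "ParallelForSimd" "PARALLELFORSimd"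
    let n8 := PySem.Str.replace n7 "ParallelForDirective" (PySem.Str.upper "ParallelForDirective")
    let n9 := PySem.Str.replace n8 "ParallelFor" "PARALLELFOR"
    pvCoreA n9.toList start

-- ===== PORT B =====
def pvSpecialCases : List (String × String) :=
  [("CXCursor_NonTypeTemplateParameter", "TEMPLATE_NON_TYPE_PARAMETER"),
   ("CXCursor_StmtExpr", "StmtExpr"),
   ("CXCursor_UnaryExpr", "CXX_UNARY_EXPR"),
   ("CXCursor_UnaryExpr", "CXX_UNARY_EXPR"),
   ("CXCursor_CompoundAssignOperator", "COMPOUND_ASSIGNMENT_OPERATOR"),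
   ("CXCursor_ObjCBridgedCastExpr", "OBJC_BRIDGE_CAST_EXPR"),
   ("CXCursor_CXXAccessSpecifier", "CXX_ACCESS_SPEC_DECL"),
   ("CXCursor_MSAsmStmt", "MS_ASM_STMT"),
   ("CXCursor_MSAsmStmt", "OMP_PARALLELFORDIRECTIVE"),
   ("CXCursor_OMPTargetTeamsDistributeParallelForDirective", "OMP_DISTRIBUTE_PARALLELFORDIRECTIVE"),
   ("CXCursor_OMPTargetTeamsDistributeParallelForDirective", "OMP_DISTRIBUTE_PARALLELFORDIRECTIVE"),
   ("CXCursor_ObjCBoolLiteralExpr", "OBJ_BOOL_LITERAL_EXPR"),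
   ("CXCursor_ObjCSelfExpr", "OBJ_SELF_EXPR"),
   ("CXCursor_NoDuplicateAttr", "NODUPLICATE_ATTR"),
   ("CXCursor_OMPTargetParallelForSimdDirective", "OMP_TARGET_PARALLEL_FOR_SIMD_DIRECTIVE"),
   ("CXCursor_OMPParallelForDirective", "OMP_PARALLEL_FOR_DIRECTIVE"),
   ("CXCursor_OMPTargetParallelForDirective", "OMP_TARGET_PARALLELFOR_DIRECTIVE"),
   ("CXCursor_OMPDistributeParallelForDirective", "OMP_DISTRIBUTE_PARALLELFOR_DIRECTIVE"),
   ("CXCursor_OMPDistributeParallelForSimdDirective", "OMP_DISTRIBUTE_PARALLEL_FOR_SIMD_DIRECTIVE")]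

def pvRewriteRules : List (String × String) :=
  [("ObjC", "OBJC_"), ("CXX", "CXX_"), ("SEH", "SEH_"), ("OMP", "OMP_"),
   ("GNU", "GNU_"), ("IB", "IB_"),
   ("ParallelForSimd", "PARALLELFORSimd"),
   ("ParallelForDirective", "PARALLELFORDIRECTIVE"),
   ("ParallelFor", "PARALLELFOR")]

-- Source B's two phases, step for step: cuts = the filtered range of boundary indices,
-- bounds = [start+1] + cuts + [len], body = '_'.join(name[i:j] for pairs of bounds),
-- result = (name[start] + body).upper() (name[start] raises IndexError when out of
-- range, like A — the 'none' branch, excluded by Pre_), then the trailing-PORT rule.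
def pvCoreB (cs : List Char) (start : Int) : String :=
  match PySem.List.pyGet? cs start with
  | none => ""   -- Python: IndexError at name[start]; excluded by Pre_
  | some c =>
    let cuts := (PySem.List.pyRange (start + 2) (PySem.Chars.len cs) 1).filter
      (fun k => PySem.Chars.isupper (PySem.List.pyGetD cs k ' ')
             && PySem.Chars.islower (PySem.List.pyGetD cs (k - 1) ' '))
    let bounds : List Int := (start + 1) :: (cuts ++ [PySem.Chars.len cs])
    let body := PySem.Chars.join ['_'] ((bounds.zip bounds.tail).map
      (fun ij => PySem.List.slice cs (some ij.1) (some ij.2)))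
    let r := PySem.Chars.upper (c :: body)
    let r := if PySem.Chars.endswith r "PORT".toList then r ++ "_ATTR".toList else r
    String.ofList r

def pythonize_name_alt (name : String) : String :=
  match pvSpecialCases.lookup name with
  | some value => value
  | none =>
    let start : Int := PySem.Str.find name "_" + 1
    let name := pvRewriteRules.foldl (fun s p => PySem.Str.replace s p.1 p.2) name
    pvCoreB name.toList start

-- ===== PRECONDITION & SPEC =====
-- Pre_ is exactly the inputs on which A returns: it excludes names without '_' (the assert
-- fails, AssertionError) and names whose first '_' is the last character while none of the six
-- keyword replacements fires (then name[start] raises IndexError in A and in B alike);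
-- wherever a keyword occurs, the replacement inserts an '_' and name[start] is in range,
-- so those inputs stay inside.
def Pre_pythonize_name (name : String) : Prop :=
  PySem.Str.isIn "_" name = true ∧
  (PySem.Str.find name "_" + 1 < PySem.Str.len name ∨
   PySem.Str.isIn "ObjC" name = true ∨ PySem.Str.isIn "CXX" name = true ∨
   PySem.Str.isIn "SEH" name = true ∨ PySem.Str.isIn "OMP" name = true ∨
   PySem.Str.isIn "GNU" name = true ∨ PySem.Str.isIn "IB" name = true)
instance (name : String) : Decidable (Pre_pythonize_name name) := by unfold Pre_pythonize_name; infer_instance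
def pvWitness_pythonize_name : String := "CXCursor_DeclStmt"

def Spec_pythonize_name (name : String) (out : String) : Prop := out = pythonize_name_alt name
instance (name : String) (out : String) : Decidable (Spec_pythonize_name name out) := by unfold Spec_pythonize_name; infer_instance

-- ===== CLAIM (what is proved, stated in full; the proofs are below) =====
def Claim_equal_pythonize_name : Prop := ∀ (name : String), Dom_pythonize_name name → Pre_pythonize_name name → Spec_pythonize_name name (pythonize_name name)

-- ===== LEMMAS AND PROOFS =====

-- the raw pairwise chunks: one chunk per character, '_'-prefixed at a lower→upper boundary
def pvPW (prev : Char) (l : List Char) : List Char :=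
  match l with
  | [] => []
  | c :: r => (if PySem.Chars.isupper c && PySem.Chars.islower prev then ['_', c] else [c]) ++ pvPW c r

theorem pvPW_cons (p c : Char) (r : List Char) :
    pvPW p (c :: r) =
      (if PySem.Chars.isupper c && PySem.Chars.islower p then ['_', c] else [c]) ++ pvPW c r := rfl

theorem pv_upperChar_underscore : PySem.Chars.upperChar '_' = '_' := by decide

-- A's loop from index j ≥ start+2 onward appends the uppercased pairwise chunks of drop j
theorem pv_loopA_aux (cs : List Char) (t : Nat) :
    ∀ (n j : Nat) (p : Char) (acc : List Char), n = cs.length - j → t + 2 ≤ j →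
      cs[j-1]? = some p →
      (PySem.List.pyRange ((j : Nat) : Int) (PySem.Chars.len cs) 1).foldl
        (fun r k =>
          let r := if decide (((t : Nat) : Int) + 1 < k) && PySem.Chars.isupper (PySem.List.pyGetD cs k ' ')
                      && PySem.Chars.islower (PySem.List.pyGetD cs (k - 1) ' ')
                   then r ++ ['_'] else r
          r ++ [PySem.Chars.upperChar (PySem.List.pyGetD cs k ' ')]) acc
      = acc ++ (pvPW p (cs.drop j)).map PySem.Chars.upperChar := by
  intro n
  induction n with
  | zero =>
    intro j p acc hn hj _
    have hlen : cs.length ≤ j := by omega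
    rw [PySem.List.pyRange_one_eq_nil (by simp only [PySem.Chars.len]; omega)]
    simp [List.drop_eq_nil_of_le hlen, pvPW]
  | succ n ih =>
    intro j p acc hn hj hp
    have hjlt : j < cs.length := by omega
    rw [PySem.List.pyRange_one_cons (by simp only [PySem.Chars.len]; omega)]
    rw [List.foldl_cons]
    have hget : PySem.List.pyGetD cs ((j : Nat) : Int) ' ' = cs[j] := by
      rw [PySem.List.pyGetD_eq_getElem cs ' ' (by positivity) (by exact_mod_cast hjlt)]
      simp
    have hcast : ((j : Nat) : Int) - 1 = (((j - 1 : Nat)) : Int) := by omega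
    have hgetp : PySem.List.pyGetD cs (((j : Nat) : Int) - 1) ' ' = p := by
      rw [hcast, PySem.List.pyGetD_eq_getElem cs ' ' (by positivity) (by
        have : j - 1 < cs.length := by omega
        exact_mod_cast this)]
      simp only [Int.toNat_natCast]
      rw [List.getElem?_eq_getElem (by omega)] at hp
      exact (Option.some_inj.mp hp).symm ▸ rfl
    have hguard : decide (((t : Nat) : Int) + 1 < ((j : Nat) : Int)) = true := by
      simp; omega
    have hdrop : cs.drop j = cs[j] :: cs.drop (j + 1) := List.drop_eq_getElem_cons hjlt
    have hnext : cs[(j+1)-1]? = some cs[j] := by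
      simp [List.getElem?_eq_getElem hjlt]
    rw [show ((j : Nat) : Int) + 1 = (((j + 1 : Nat)) : Int) from by push_cast; ring]
    rw [ih (j + 1) cs[j] _ (by omega) (by omega) hnext]
    simp only [hget, hgetp, hguard, Bool.true_and, hdrop, pvPW_cons]
    by_cases hb : PySem.Chars.isupper cs[j] && PySem.Chars.islower p
    · simp [hb, pv_upperChar_underscore]
    · simp [hb]

-- B-side abbreviations (proof-only): the boundary guard, the bounds list from position j,
-- the joined slices, and the intended word list D(j) = head :: pairwise chunks
def pvG (cs : List Char) (k : Int) : Bool :=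
  PySem.Chars.isupper (PySem.List.pyGetD cs k ' ')
    && PySem.Chars.islower (PySem.List.pyGetD cs (k - 1) ' ')

def pvBnds (cs : List Char) (j : Nat) : List Int :=
  ((j : Nat) : Int) ::
    ((PySem.List.pyRange (((j : Nat) : Int) + 1) (PySem.Chars.len cs) 1).filter (pvG cs)
      ++ [PySem.Chars.len cs])

def pvJoin (cs : List Char) (bs : List Int) : List Char :=
  PySem.Chars.join ['_'] ((bs.zip bs.tail).map
    (fun ij => PySem.List.slice cs (some ij.1) (some ij.2)))

def pvD (cs : List Char) (j : Nat) : List Char :=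
  (cs[j]?).elim [] (fun cj => cj :: pvPW cj (cs.drop (j + 1)))

theorem pvD_none (cs : List Char) (j : Nat) (hc : cs[j]? = none) : pvD cs j = [] := by
  simp [pvD, hc]

theorem pvD_some (cs : List Char) (j : Nat) (cj : Char) (hc : cs[j]? = some cj) :
    pvD cs j = cj :: pvPW cj (cs.drop (j + 1)) := by
  simp [pvD, hc]

theorem pv_join_head (c : Char) (p : List Char) (rest : List (List Char)) :
    PySem.Chars.join ['_'] ((c :: p) :: rest) = c :: PySem.Chars.join ['_'] (p :: rest) := by
  cases rest with
  | nil => rw [PySem.Chars.join_singleton, PySem.Chars.join_singleton]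
  | cons q qs => rw [PySem.Chars.join_cons_cons, PySem.Chars.join_cons_cons]; simp

theorem pv_slice_cons (cs : List Char) (j : Nat) (m : Int) (cj : Char)
    (hc : cs[j]? = some cj) (hm : (j : Int) < m) (hml : m ≤ (cs.length : Int)) :
    PySem.List.slice cs (some ((j : Nat) : Int)) (some m)
      = cj :: PySem.List.slice cs (some (((j : Nat) : Int) + 1)) (some m) := by
  obtain ⟨mN, rfl⟩ : ∃ mN : Nat, m = (mN : Int) := ⟨m.toNat, by omega⟩
  have hjm : j < mN := by exact_mod_cast hm
  have hjl : j < cs.length := by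
    by_contra h
    rw [List.getElem?_eq_none_iff.mpr (by omega)] at hc
    simp at hc
  rw [show (((j : Nat) : Int) + 1) = (((j + 1 : Nat)) : Int) from by push_cast; ring]
  rw [PySem.List.slice_natCast, PySem.List.slice_natCast]
  have hdrop : cs.drop j = cj :: cs.drop (j + 1) := by
    rw [List.drop_eq_getElem_cons hjl]
    rw [List.getElem?_eq_getElem hjl] at hc
    rw [Option.some_inj.mp hc]
  rw [hdrop, show mN - j = (mN - (j + 1)) + 1 from by omega, List.take_succ_cons]

-- peeling one full word boundary off the joined slices
theorem pv_join_cons_bound (cs : List Char) (a b : Int) (R : List Int) (hR : R ≠ []) :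
    pvJoin cs (a :: b :: R)
      = PySem.List.slice cs (some a) (some b) ++ ['_'] ++ pvJoin cs (b :: R) := by
  obtain ⟨m0, R', rfl⟩ := List.exists_cons_of_ne_nil hR
  unfold pvJoin
  simp only [List.tail_cons, List.zip_cons_cons, List.map_cons]
  rw [PySem.Chars.join_cons_cons]

-- extending the first word one character to the left
theorem pv_join_head_bound (cs : List Char) (j : Nat) (cj : Char) (m0 : Int) (R' : List Int)
    (hc : cs[j]? = some cj) (hm : (j : Int) < m0) (hml : m0 ≤ (cs.length : Int)) :
    pvJoin cs (((j : Nat) : Int) :: m0 :: R')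
      = cj :: pvJoin cs ((((j : Nat) : Int) + 1) :: m0 :: R') := by
  unfold pvJoin
  simp only [List.tail_cons, List.zip_cons_cons, List.map_cons]
  rw [pv_slice_cons cs j m0 cj hc hm hml, pv_join_head]

-- the heart of the B side: joining the slices at the cut bounds from position j yields
-- the head character followed by the pairwise '_' chunks
theorem pv_joinB_aux (cs : List Char) :
    ∀ (n j : Nat), n = cs.length - j → j ≤ cs.length →
      pvJoin cs (pvBnds cs j) = pvD cs j := by
  have hlen : PySem.Chars.len cs = (cs.length : Int) := by simp [PySem.Chars.len]
  intro n
  induction n with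
  | zero =>
    intro j hn hj
    have hje : j = cs.length := by omega
    subst hje
    rw [pvD_none cs _ (by rw [List.getElem?_eq_none_iff])]
    unfold pvBnds pvJoin
    rw [PySem.List.pyRange_one_eq_nil (by rw [hlen]; omega), hlen]
    simp only [List.filter_nil, List.nil_append, List.tail_cons, List.zip_cons_cons,
      List.zip_nil_right, List.map_cons, List.map_nil]
    rw [PySem.List.slice_natCast]
    simp [PySem.Chars.join_singleton]
  | succ n ih =>
    intro j hn hj
    have hjlt : j < cs.length := by omega
    have hdropj : cs.drop j = cs[j] :: cs.drop (j + 1) := List.drop_eq_getElem_cons hjlt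
    have hcj : cs[j]? = some cs[j] := List.getElem?_eq_getElem hjlt
    by_cases hlt : ((j : Nat) : Int) + 1 < PySem.Chars.len cs
    · -- j + 1 < len
      have hj1 : j + 1 < cs.length := by rw [hlen] at hlt; exact_mod_cast hlt
      have hdropj1 : cs.drop (j + 1) = cs[j + 1] :: cs.drop (j + 2) :=
        List.drop_eq_getElem_cons hj1
      have hg1 : PySem.List.pyGetD cs (((j : Nat) : Int) + 1) ' ' = cs[j + 1] := by
        rw [show ((j : Nat) : Int) + 1 = (((j + 1 : Nat)) : Int) from by push_cast; ring]
        rw [PySem.List.pyGetD_eq_getElem cs ' ' (by positivity) (by exact_mod_cast hj1)]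
        simp
      have hg0 : PySem.List.pyGetD cs (((j : Nat) : Int) + 1 - 1) ' ' = cs[j] := by
        rw [show ((j : Nat) : Int) + 1 - 1 = ((j : Nat) : Int) from by ring]
        rw [PySem.List.pyGetD_eq_getElem cs ' ' (by positivity) (by exact_mod_cast hjlt)]
        simp
      have hGeq : pvG cs (((j : Nat) : Int) + 1)
          = (PySem.Chars.isupper cs[j + 1] && PySem.Chars.islower cs[j]) := by
        unfold pvG; rw [hg1, hg0]
      have hcast1 : (((j + 1 : Nat)) : Int) = ((j : Nat) : Int) + 1 := by push_cast; ring
      have hIH := ih (j + 1) (by omega) (by omega)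
      unfold pvBnds at hIH
      rw [hcast1] at hIH
      unfold pvBnds
      rw [PySem.List.pyRange_one_cons hlt, List.filter_cons]
      by_cases hg : pvG cs (((j : Nat) : Int) + 1) = true
      · -- boundary at j+1: a cut is emitted there
        rw [if_pos hg]
        simp only [List.cons_append]
        rw [pv_join_cons_bound cs _ _ _ (by simp), hIH]
        have hs0 : PySem.List.slice cs (some ((j : Nat) : Int)) (some (((j : Nat) : Int) + 1))
            = [cs[j]] := by
          rw [show (((j : Nat) : Int) + 1) = (((j + 1 : Nat)) : Int) from by push_cast; ring]
          rw [PySem.List.slice_natCast, show j + 1 - j = 1 from by omega, hdropj]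
          simp only [List.take_succ_cons, List.take_zero]
        rw [hs0, pvD_some cs j cs[j] hcj, pvD_some cs (j + 1) cs[j + 1]
          (List.getElem?_eq_getElem hj1), hdropj1, pvPW_cons]
        rw [hGeq] at hg
        rw [if_pos hg]
        simp
      · -- no boundary at j+1: the first word extends past j+1
        rw [if_neg hg]
        obtain ⟨m0, R', hRc⟩ := List.exists_cons_of_ne_nil
          (l := (PySem.List.pyRange (((j : Nat) : Int) + 1 + 1) (PySem.Chars.len cs) 1).filter (pvG cs)
            ++ [PySem.Chars.len cs]) (by simp)
        have hm0 : ((j : Nat) : Int) < m0 ∧ m0 ≤ (cs.length : Int) := by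
          have hmem : m0 ∈ (PySem.List.pyRange (((j : Nat) : Int) + 1 + 1) (PySem.Chars.len cs) 1).filter (pvG cs)
              ++ [PySem.Chars.len cs] := by rw [hRc]; exact List.mem_cons_self
          rcases List.mem_append.mp hmem with hmem | hmem
          · have := (PySem.List.mem_pyRange_one).mp (List.mem_filter.mp hmem).1
            rw [hlen] at this
            constructor <;> omega
          · simp only [List.mem_singleton] at hmem
            rw [hmem, hlen]
            constructor
            · exact_mod_cast hjlt
            · omega
        rw [hRc] at hIH ⊢
        rw [pv_join_head_bound cs j cs[j] m0 R' hcj hm0.1 hm0.2, hIH]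
        rw [pvD_some cs j cs[j] hcj, pvD_some cs (j + 1) cs[j + 1]
          (List.getElem?_eq_getElem hj1), hdropj1, pvPW_cons]
        rw [hGeq] at hg
        rw [if_neg hg]
        simp
    · -- j + 1 = len: no cuts remain; bounds = [j, len], a single word
      have hje : j + 1 = cs.length := by rw [hlen] at hlt; omega
      have hdnil : cs.drop (j + 1) = [] := by rw [List.drop_eq_nil_iff]; omega
      rw [pvD_some cs j cs[j] hcj, hdnil]
      unfold pvBnds pvJoin
      rw [PySem.List.pyRange_one_eq_nil (by omega), hlen]
      simp only [List.filter_nil, List.nil_append, List.tail_cons, List.zip_cons_cons,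
        List.zip_nil_right, List.map_cons, List.map_nil]
      rw [PySem.List.slice_natCast, hdropj, hdnil]
      simp [PySem.Chars.join_singleton, pvPW, show cs.length - j = 1 from by omega]

-- the heart: A's index loop equals B's cut/slice/join phases, for every list and start ≥ 0
theorem pv_core_eq (cs : List Char) (s : Int) (hs : 0 ≤ s) : pvCoreA cs s = pvCoreB cs s := by
  obtain ⟨t, rfl⟩ : ∃ t : Nat, s = (t : Int) := ⟨s.toNat, (Int.toNat_of_nonneg hs).symm⟩
  unfold pvCoreA pvCoreB
  rw [PySem.List.pyGet?_natCast]
  cases h : cs[t]? with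
  | none => rfl
  | some c =>
    have htlt : t < cs.length := by
      by_contra hlt
      rw [List.getElem?_eq_none_iff.mpr (by omega)] at h
      simp at h
    -- B's body is pvJoin over pvBnds at j = t + 1
    have hcast1 : (((t + 1 : Nat)) : Int) = ((t : Nat) : Int) + 1 := by push_cast; ring
    have hB : PySem.Chars.join ['_']
        (List.map (fun ij => PySem.List.slice cs (some ij.1) (some ij.2))
          (List.zip
            (((((t : Nat) : Int) + 1)) ::
              ((PySem.List.pyRange (((t : Nat) : Int) + 2) (PySem.Chars.len cs) 1).filter
                (fun k => PySem.Chars.isupper (PySem.List.pyGetD cs k ' ')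
                       && PySem.Chars.islower (PySem.List.pyGetD cs (k - 1) ' '))
                ++ [PySem.Chars.len cs]))
            ((PySem.List.pyRange (((t : Nat) : Int) + 2) (PySem.Chars.len cs) 1).filter
                (fun k => PySem.Chars.isupper (PySem.List.pyGetD cs k ' ')
                       && PySem.Chars.islower (PySem.List.pyGetD cs (k - 1) ' '))
                ++ [PySem.Chars.len cs])))
        = pvD cs (t + 1) := by
      have haux := pv_joinB_aux cs (cs.length - (t + 1)) (t + 1) rfl (by omega)
      unfold pvBnds pvJoin pvG at haux
      rw [hcast1] at haux
      rw [show ((t : Nat) : Int) + 1 + 1 = ((t : Nat) : Int) + 2 from by ring] at haux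
      simpa using haux
    simp only [List.tail_cons]
    rw [hB]
    -- now evaluate A's loop
    cases hrest : cs.drop (t + 1) with
    | nil =>
      have hne : cs[t + 1]? = none := by
        rw [List.getElem?_eq_none_iff]
        have h' := congrArg List.length hrest
        simp only [List.length_drop, List.length_nil] at h'
        omega
      rw [PySem.List.pyRange_one_eq_nil (by
        simp only [PySem.Chars.len]
        have h' := congrArg List.length hrest
        simp only [List.length_drop, List.length_nil] at h'
        omega)]
      simp only [List.foldl_nil]
      rw [pvD_none cs (t + 1) hne]
      simp [PySem.Chars.upper]
    | cons c1 rest2 =>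
      have hlen2 : t + 1 < cs.length := by
        have h' := congrArg List.length hrest
        simp only [List.length_drop, List.length_cons] at h'
        omega
      have hget1 : cs[t + 1]? = some c1 := by
        have h0 : (cs.drop (t + 1))[0]? = some c1 := by rw [hrest]; rfl
        rw [List.getElem?_drop] at h0
        simpa using h0
      -- A's loop: peel the first iteration (k = t+1, guard false), then pv_loopA_aux
      rw [PySem.List.pyRange_one_cons (by simp only [PySem.Chars.len]; omega)]
      rw [List.foldl_cons]
      have hgetd1 : PySem.List.pyGetD cs (((t : Nat) : Int) + 1) ' ' = c1 := by
        rw [show ((t : Nat) : Int) + 1 = (((t + 1 : Nat)) : Int) from by push_cast; ring]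
        rw [PySem.List.pyGetD_eq_getElem cs ' ' (by positivity) (by exact_mod_cast hlen2)]
        simp only [Int.toNat_natCast]
        rw [List.getElem?_eq_getElem hlen2] at hget1
        exact (Option.some_inj.mp hget1).symm ▸ rfl
      have hguard0 : decide (((t : Nat) : Int) + 1 < ((t : Nat) : Int) + 1) = false := by simp
      have hnext : cs[(t + 2) - 1]? = some c1 := by
        rw [show t + 2 - 1 = t + 1 from by omega]; exact hget1
      have hdrop2 : cs.drop (t + 2) = rest2 := by
        have h2 : (cs.drop (t + 1)).tail = rest2 := by rw [hrest, List.tail_cons]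
        rw [← h2, List.tail_drop]
      simp only [hguard0, Bool.false_and, Bool.false_eq_true, if_false, hgetd1]
      rw [show ((t : Nat) : Int) + 1 + 1 = (((t + 2 : Nat)) : Int) from by push_cast; ring]
      rw [pv_loopA_aux cs t (cs.length - (t + 2)) (t + 2) c1 _ rfl (by omega) hnext]
      rw [hdrop2]
      rw [pvD_some cs (t + 1) c1 hget1, hdrop2]
      simp [PySem.Chars.upper]

-- the if-chain of A and the lookup of B agree; with no special case both fall through to the core
theorem pv_lookup_mem {α β : Type} [BEq α] [LawfulBEq α] (l : List (α × β)) (a : α) (b : β) :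
    l.lookup a = some b → a ∈ l.map Prod.fst := by
  induction l with
  | nil => intro h; simp [List.lookup] at h
  | cons p tl ih =>
    intro h
    rw [List.map_cons]
    cases hbe : a == p.1
    · unfold List.lookup at h
      rw [hbe] at h
      exact List.mem_cons_of_mem _ (ih h)
    · exact (eq_of_beq hbe) ▸ List.mem_cons_self

theorem pv_main (name : String) (hne : pvSpecialCases.lookup name = none) :
    pythonize_name name = pythonize_name_alt name := by
  have hlist : ∀ k : String, pvSpecialCases.lookup k ≠ none → ¬ name = k :=
    fun k hk heq => hk (heq ▸ hne)
  unfold pythonize_name pythonize_name_alt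
  rw [hne]
  rw [if_neg (hlist _ (by decide)), if_neg (hlist _ (by decide)), if_neg (hlist _ (by decide)),
      if_neg (hlist _ (by decide)), if_neg (hlist _ (by decide)), if_neg (hlist _ (by decide)),
      if_neg (hlist _ (by decide)), if_neg (hlist _ (by decide)), if_neg (hlist _ (by decide)),
      if_neg (hlist _ (by decide)), if_neg (hlist _ (by decide)), if_neg (hlist _ (by decide)),
      if_neg (hlist _ (by decide)), if_neg (hlist _ (by decide)), if_neg (hlist _ (by decide)),
      if_neg (hlist _ (by decide)), if_neg (hlist _ (by decide)), if_neg (hlist _ (by decide)),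
      if_neg (hlist _ (by decide))]
  simp only [pvRewriteRules, List.foldl_cons, List.foldl_nil]
  exact pv_core_eq _ _ (by
    have := PySem.Chars.neg_one_le_find name.toList "_".toList
    rw [PySem.Str.find_eq]
    omega)

-- ===== VERDICT (by name: the statement is the Claim_ definition above) =====
set_option maxRecDepth 40000 in
theorem pythonize_name_spec : Claim_equal_pythonize_name := by
  intro name _ _
  unfold Spec_pythonize_name
  cases hlk : pvSpecialCases.lookup name with
  | none => exact pv_main name hlk
  | some v =>
    have hmem := pv_lookup_mem _ _ _ hlk
    simp only [pvSpecialCases, List.map_cons, List.map_nil] at hmem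
    fin_cases hmem <;> decide
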